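-- pv_equiv track=rewrite | github.com/tarunganesh2004/GFG | 2025/June/20th_june.py | groupBalls
-- ===== SOURCE A (Python) =====
-- def groupBalls(arr, k):
--     from collections import Counter
--     n=len(arr)
--     if n % k != 0:
--         return False  # Cannot group if total balls are not divisible by k
--
--     arr.sort()
--     # d=dict(Counter(list(arr)))
--     d=Counter(arr)
--
--     for item in arr:
--         if d[item]==0:
--             continue
--
--         temp=k
--         cur=item
--
--         while temp>0:
--             if cur not in d or d[cur]==0:
--                 return False
--             d[cur]-=1
--             cur+=1
--             temp-=1
--     return True
-- ===== SOURCE B (Python) =====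
-- def groupBalls(arr, k):
--     from collections import Counter
--     n = len(arr)
--     if n % k != 0:
--         return False  # preserves ZeroDivisionError at k == 0, like A
--     arr.sort()
--     cnt = Counter(arr)
--     for c in sorted(cnt):
--         need = cnt[c]
--         if need > 0:
--             for i in range(k):
--                 if cnt[c + i] < need:
--                     return False
--                 cnt[c + i] -= need
--     return True
-- ===== Notes on version B (the rewrite author's own statement) =====
-- stated objective: alternative
-- what changed: Instead of iterating over every ball and consuming k consecutive values one at a time with an inner while loop, B iterates over the sorted distinct values and, for each value with remaining count need>0, checks and subtracts need in one block from each of the k consecutive counts.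
import Mathlib
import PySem

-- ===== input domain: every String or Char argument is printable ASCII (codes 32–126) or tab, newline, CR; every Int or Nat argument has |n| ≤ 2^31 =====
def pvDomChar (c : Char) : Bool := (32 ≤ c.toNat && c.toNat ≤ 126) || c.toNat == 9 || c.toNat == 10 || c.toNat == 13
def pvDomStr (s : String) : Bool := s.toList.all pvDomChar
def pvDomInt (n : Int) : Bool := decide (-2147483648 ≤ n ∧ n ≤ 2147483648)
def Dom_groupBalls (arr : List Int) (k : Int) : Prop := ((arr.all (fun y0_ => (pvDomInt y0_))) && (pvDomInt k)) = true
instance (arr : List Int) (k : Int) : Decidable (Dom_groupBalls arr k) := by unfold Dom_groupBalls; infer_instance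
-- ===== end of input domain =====

-- B replaces A's per-ball inner while loop (consume k consecutive values one at a time)
-- by a per-distinct-value block subtraction over the sorted keys: an alternative decomposition,
-- same sort-side-effect on arr (equivalence proved about the return value).

-- ===== PORT A =====
-- while temp>0: check `cur not in d or d[cur]==0`, d[cur]-=1, cur+=1, temp-=1
def consumeA (d : PySem.Dict Int Int) (cur : Int) (temp : Int) : Option (PySem.Dict Int Int) :=
  if 0 < temp then
    if !(d.contains cur) || d.getD cur 0 == 0 then none
    else consumeA (d.modify cur 0 (· - 1)) (cur + 1) (temp - 1)
  else some d
termination_by temp.toNat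
decreasing_by omega

-- for item in arr: if d[item]==0: continue; else run the while loop (False on failure)
def loopA (k : Int) (d : PySem.Dict Int Int) (items : List Int) : Bool :=
  match items with
  | [] => true
  | item :: rest =>
    if d.getD item 0 == 0 then loopA k d rest
    else
      match consumeA d item k with
      | none => false
      | some d' => loopA k d' rest

def groupBalls (arr : List Int) (k : Int) : Bool :=
  if PySem.Int.mod (arr.length : Int) k != 0 then false
  else
    let sortedArr := PySem.List.sorted arr (fun x => x) false
    let d := PySem.Dict.counter sortedArr
    loopA k d sortedArr

-- ===== PORT B =====
-- for i in range(k): if cnt[c+i] < need: return False; cnt[c+i] -= need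
def consumeB (cnt : PySem.Dict Int Int) (c : Int) (need : Int) (idxs : List Int) : Option (PySem.Dict Int Int) :=
  match idxs with
  | [] => some cnt
  | i :: rest =>
    if cnt.getD (c + i) 0 < need then none
    else consumeB (cnt.modify (c + i) 0 (· - need)) c need rest

-- for c in sorted(cnt): need = cnt[c]; if need > 0: block-subtract need over c..c+k-1
def loopB (k : Int) (cnt : PySem.Dict Int Int) (keys : List Int) : Bool :=
  match keys with
  | [] => true
  | c :: rest =>
    let need := cnt.getD c 0
    if 0 < need then
      match consumeB cnt c need (PySem.List.pyRange 0 k 1) with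
      | none => false
      | some cnt' => loopB k cnt' rest
    else loopB k cnt rest

def groupBalls_alt (arr : List Int) (k : Int) : Bool :=
  if PySem.Int.mod (arr.length : Int) k != 0 then false
  else
    let sortedArr := PySem.List.sorted arr (fun x => x) false
    let cnt := PySem.Dict.counter sortedArr
    loopB k cnt (PySem.List.sorted cnt.keys (fun x => x) false)

-- ===== PRECONDITION & SPEC =====
-- Pre_ excludes only k = 0, on which Python's `n % k` raises ZeroDivisionError in both A and B.
def Pre_groupBalls (arr : List Int) (k : Int) : Prop := k ≠ 0
instance (arr : List Int) (k : Int) : Decidable (Pre_groupBalls arr k) := by unfold Pre_groupBalls; infer_instance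
def pvWitness_groupBalls : List Int × Int := ([1, 2, 3], 3)

def Spec_groupBalls (arr : List Int) (k : Int) (out : Bool) : Prop := out = groupBalls_alt arr k
instance (arr : List Int) (k : Int) (out : Bool) : Decidable (Spec_groupBalls arr k out) := by unfold Spec_groupBalls; infer_instance

-- ===== CLAIM (what is proved, stated in full; the proofs are below) =====
def Claim_equal_groupBalls : Prop := ∀ (arr : List Int) (k : Int), Dom_groupBalls arr k → Pre_groupBalls arr k → Spec_groupBalls arr k (groupBalls arr k)

-- ===== LEMMAS AND PROOFS =====

-- Abstract layer: both loops act on the dict only through `getD · 0`; we model states as Int → Int.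

def pvUpd (g : Int → Int) (v x : Int) : Int → Int := fun w => if w = v then x else g w

def pvProj (d : PySem.Dict Int Int) : Int → Int := fun v => d.getD v 0

-- one left-to-right pass over the window cur..cur+t-1: fail if a count is < need, else subtract need
def pvWin (g : Int → Int) (cur need : Int) : Nat → Option (Int → Int)
  | 0 => some g
  | t + 1 =>
    if g cur < need then none
    else pvWin (pvUpd g cur (g cur - need)) (cur + 1) need t

def pvSubW (g : Int → Int) (cur need : Int) (t : Nat) : Int → Int :=
  fun w => if cur ≤ w ∧ w < cur + (t : Int) then g w - need else g w

-- n successive single runs (A's consume repeated)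
def pvRep (g : Int → Int) (c : Int) (kN : Nat) : Nat → Option (Int → Int)
  | 0 => some g
  | n + 1 =>
    match pvWin g c 1 kN with
    | none => none
    | some g' => pvRep g' c kN n

def pvLA (kN : Nat) (g : Int → Int) (items : List Int) : Bool :=
  match items with
  | [] => true
  | x :: rest =>
    if g x = 0 then pvLA kN g rest
    else
      match pvWin g x 1 kN with
      | none => false
      | some g' => pvLA kN g' rest

def pvLB (kN : Nat) (g : Int → Int) (keys : List Int) : Bool :=
  match keys with
  | [] => true
  | c :: rest =>
    if 0 < g c then
      match pvWin g c (g c) kN with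
      | none => false
      | some g' => pvLB kN g' rest
    else pvLB kN g rest

def pvNonneg (g : Int → Int) : Prop := ∀ v, 0 ≤ g v

theorem pvWin_eq (t : Nat) : ∀ (g : Int → Int) (cur need : Int),
    pvWin g cur need t =
      if ∀ j : Nat, j < t → need ≤ g (cur + (j : Int)) then some (pvSubW g cur need t) else none := by
  induction t with
  | zero =>
    intro g cur need
    have h : pvSubW g cur need 0 = g := by
      funext w
      simp only [pvSubW, Nat.cast_zero, add_zero]
      have hw : ¬ (cur ≤ w ∧ w < cur) := by omega
      simp [hw]
    simp [pvWin, h]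
  | succ t ih =>
    intro g cur need
    by_cases h0 : g cur < need
    · rw [pvWin, if_pos h0, if_neg]
      intro hall
      have := hall 0 (Nat.succ_pos t)
      norm_num at this
      omega
    · rw [pvWin, if_neg h0, ih]
      have hup : ∀ w, w ≠ cur → pvUpd g cur (g cur - need) w = g w := by
        intro w hw; simp [pvUpd, hw]
      by_cases hc : ∀ j : Nat, j < t + 1 → need ≤ g (cur + (j : Int))
      · rw [if_pos, if_pos hc]
        · congr 1
          funext w
          simp only [pvSubW]
          by_cases hw : w = cur
          · have h1 : ¬ (cur + 1 ≤ w ∧ w < cur + 1 + (t : Int)) := by omega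
            have h2 : cur ≤ w ∧ w < cur + ((t + 1 : Nat) : Int) := by push_cast; omega
            rw [if_neg h1, if_pos h2]
            simp [pvUpd, hw]
          · rw [show pvUpd g cur (g cur - need) w = g w from hup w hw]
            by_cases h1 : cur + 1 ≤ w ∧ w < cur + 1 + (t : Int)
            · rw [if_pos h1, if_pos (by push_cast at h1 ⊢; omega)]
            · rw [if_neg h1, if_neg (by push_cast at h1 ⊢; omega)]
        · intro j hj
          rw [hup _ (by omega)]
          have := hc (j + 1) (by omega)
          convert this using 2
          push_cast; ring
      · rw [if_neg, if_neg hc]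
        intro hall
        apply hc
        intro j hj
        match j with
        | 0 => simpa using not_lt.mp h0
        | Nat.succ j' =>
          have := hall j' (by omega)
          rw [hup _ (by omega)] at this
          convert this using 2
          push_cast; ring

theorem pvSubW_nonneg (g : Int → Int) (cur need : Int) (t : Nat) (hnn : pvNonneg g)
    (h : ∀ j : Nat, j < t → need ≤ g (cur + (j : Int))) : pvNonneg (pvSubW g cur need t) := by
  intro v
  simp only [pvSubW]
  split_ifs with hv
  · have hj := h (v - cur).toNat (by omega)
    have hvv : cur + (((v - cur).toNat : Nat) : Int) = v := by omega
    rw [hvv] at hj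
    omega
  · exact hnn v

theorem pvRep_eq (kN : Nat) : ∀ (n : Nat) (g : Int → Int) (c : Int), pvNonneg g →
    pvRep g c kN n =
      if ∀ j : Nat, j < kN → (n : Int) ≤ g (c + (j : Int)) then some (pvSubW g c (n : Int) kN) else none := by
  intro n
  induction n with
  | zero =>
    intro g c hnn
    rw [if_pos (fun j _ => by simpa using hnn (c + (j : Int)))]
    have h : pvSubW g c ((0 : Nat) : Int) kN = g := by
      funext w; simp only [pvSubW]; split_ifs <;> simp
    rw [h]
    rfl
  | succ n ih =>
    intro g c hnn
    have hwin := pvWin_eq kN g c 1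
    by_cases h1 : ∀ j : Nat, j < kN → (1 : Int) ≤ g (c + (j : Int))
    · rw [if_pos h1] at hwin
      have hnn' : pvNonneg (pvSubW g c 1 kN) := pvSubW_nonneg g c 1 kN hnn h1
      have hval : ∀ j : Nat, j < kN → pvSubW g c 1 kN (c + (j : Int)) = g (c + (j : Int)) - 1 := by
        intro j hj; simp only [pvSubW]
        rw [if_pos (by constructor <;> [omega; (push_cast; omega)])]
      simp only [pvRep, hwin]
      rw [ih _ _ hnn']
      by_cases h2 : ∀ j : Nat, j < kN → ((n + 1 : Nat) : Int) ≤ g (c + (j : Int))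
      · rw [if_pos, if_pos h2]
        · congr 1
          funext w
          simp only [pvSubW]
          split_ifs with hw
          · push_cast; ring
          · rfl
        · intro j hj
          rw [hval j hj]
          have := h2 j hj
          push_cast at this ⊢
          omega
      · rw [if_neg, if_neg h2]
        intro hcc
        apply h2
        intro j hj
        have := hcc j hj
        rw [hval j hj] at this
        push_cast at this ⊢
        omega
    · rw [if_neg h1] at hwin
      simp only [pvRep, hwin]
      rw [if_neg]
      intro hcc
      apply h1
      intro j hj
      have h2 := hcc j hj
      push_cast at h2
      omega

theorem pvBlockA (kN : Nat) : ∀ (m : Nat) (g : Int → Int) (c : Int) (rest : List Int),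
    pvNonneg g → g c ≤ (m : Int) →
    pvLA kN g (List.replicate m c ++ rest) =
      (match pvRep g c kN (g c).toNat with
       | none => false
       | some g' => pvLA kN g' rest) := by
  cases kN with
  | zero =>
    have hrep : ∀ (n : Nat) (g : Int → Int) (c : Int), pvRep g c 0 n = some g := by
      intro n
      induction n with
      | zero => intro g c; rfl
      | succ n ih => intro g c; simp only [pvRep, pvWin]; exact ih g c
    have hla : ∀ (m : Nat) (g : Int → Int) (c : Int) (rest : List Int),
        pvLA 0 g (List.replicate m c ++ rest) = pvLA 0 g rest := by
      intro m
      induction m with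
      | zero => intro g c rest; rfl
      | succ m ih =>
        intro g c rest
        rw [List.replicate_succ, List.cons_append]
        simp only [pvLA, pvWin]
        split_ifs with h <;> exact ih g c rest
    intro m g c rest _ _
    simp [hla, hrep]
  | succ K =>
    intro m
    induction m with
    | zero =>
      intro g c rest hnn hle
      have hgc : g c = 0 := le_antisymm (by exact_mod_cast hle) (hnn c)
      have ht : (g c).toNat = 0 := by omega
      rw [ht]
      simp [pvRep, List.replicate]
    | succ m ih =>
      intro g c rest hnn hle
      rw [List.replicate_succ, List.cons_append]
      simp only [pvLA]
      by_cases hgc : g c = 0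
      · rw [if_pos hgc]
        exact ih g c rest hnn (by omega)
      · rw [if_neg hgc]
        have hpos : 1 ≤ g c := by have := hnn c; omega
        have ht : (g c).toNat = (g c - 1).toNat + 1 := by omega
        rw [ht]
        simp only [pvRep]
        cases hw : pvWin g c 1 (K + 1) with
        | none => simp
        | some g' =>
          simp only []
          have heq := pvWin_eq (K + 1) g c 1
          rw [hw] at heq
          by_cases hcond : ∀ j : Nat, j < K + 1 → (1 : Int) ≤ g (c + (j : Int))
          · rw [if_pos hcond] at heq
            have hg' : g' = pvSubW g c 1 (K + 1) := by simpa using heq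
            have hnn' : pvNonneg g' := hg' ▸ pvSubW_nonneg g c 1 (K + 1) hnn hcond
            have hval : g' c = g c - 1 := by
              rw [hg']
              simp only [pvSubW]
              rw [if_pos ⟨le_refl c, by push_cast; omega⟩]
            rw [ih g' c rest hnn' (by rw [hval]; push_cast at hle ⊢; omega), hval]
          · rw [if_neg hcond] at heq
            exact absurd heq (by simp)

theorem pvDecomp : ∀ (s : List Int) (c : Int), s.Pairwise (· ≤ ·) → s.head? = some c →
    s = List.replicate (s.count c) c ++ s.dropWhile (fun x => x == c) ∧
      ∀ x ∈ s.dropWhile (fun x => x == c), c < x := by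
  intro s
  induction s with
  | nil => intro c _ h; simp at h
  | cons a t ih =>
    intro c hp hh
    have hac : a = c := by simpa using hh
    subst hac
    rw [List.pairwise_cons] at hp
    obtain ⟨hall, hpt⟩ := hp
    cases t with
    | nil =>
      constructor
      · simp [List.count_cons, List.dropWhile]
      · simp [List.dropWhile]
    | cons b t' =>
      by_cases hb : a = b
      · rw [← hb] at ih hpt ⊢
        obtain ⟨ihe, ihlt⟩ := ih a hpt (by simp)
        constructor
        · have hcnt : (a :: a :: t').count a = (a :: t').count a + 1 := by
            simp [List.count_cons]
          have hd : (a :: a :: t').dropWhile (fun x => x == a) =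
              (a :: t').dropWhile (fun x => x == a) := by
            simp [List.dropWhile]
          rw [hcnt, hd, List.replicate_succ, List.cons_append]
          exact congrArg (a :: ·) ihe
        · intro x hx
          apply ihlt
          simpa [List.dropWhile] using hx
      · have hba : a < b := lt_of_le_of_ne (hall b (by simp)) hb
        have hbt : ∀ x ∈ b :: t', a < x := by
          intro x hx
          rcases List.mem_cons.mp hx with h | h
          · rw [h]; exact hba
          · have hble : b ≤ x := (List.pairwise_cons.mp hpt).1 x h
            omega
        have hnot : a ∉ b :: t' := fun h => lt_irrefl a (hbt a h)
        have hba2 : (b == a) = false := beq_eq_false_iff_ne.mpr (Ne.symm hb)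
        have hcnt : (a :: b :: t').count a = 1 := by
          simp [List.count_cons, List.count_eq_zero.mpr hnot]
        have hd : (a :: b :: t').dropWhile (fun x => x == a) = b :: t' := by
          simp [List.dropWhile, hba2]
        rw [hcnt, hd]
        refine ⟨?_, hbt⟩
        rfl

theorem pvKeysDecomp (s : List Int) (c : Int) (rest : List Int) (m : Nat)
    (hs : s = List.replicate m c ++ rest) (hm : 1 ≤ m)
    (hrest : ∀ x ∈ rest, c < x) :
    PySem.List.sorted (PySem.Set.ofList s) (fun x => x) false =
      c :: PySem.List.sorted (PySem.Set.ofList rest) (fun x => x) false := by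
  have hmemr : ∀ a, a ∈ PySem.List.sorted (PySem.Set.ofList rest) (fun x => x) false ↔ a ∈ rest := by
    intro a
    rw [PySem.List.mem_sorted]
    exact PySem.Set.mem_ofList rest a
  have hnd1 : (c :: PySem.List.sorted (PySem.Set.ofList rest) (fun x => x) false).Nodup := by
    rw [List.nodup_cons]
    constructor
    · intro hmem
      exact lt_irrefl c (hrest c ((hmemr c).mp hmem))
    · exact ((PySem.List.sorted_perm (PySem.Set.ofList rest) (fun x => x) false).nodup_iff).mpr
        (PySem.Set.nodup_ofList rest)
  have hnd2 : (PySem.Set.ofList s : List Int).Nodup := PySem.Set.nodup_ofList s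
  apply PySem.List.sorted_eq_of_perm_of_pairwise_lt
  · rw [List.perm_ext_iff_of_nodup hnd1 hnd2]
    intro a
    rw [List.mem_cons, hmemr a, PySem.Set.mem_ofList, hs, List.mem_append, List.mem_replicate]
    constructor
    · rintro (h | h)
      · exact Or.inl ⟨by omega, h⟩
      · exact Or.inr h
    · rintro (⟨_, h⟩ | h)
      · exact Or.inl h
      · exact Or.inr h
  · rw [List.pairwise_cons]
    constructor
    · intro b hb
      exact hrest b ((hmemr b).mp hb)
    · exact PySem.List.sorted_ofList_pairwise_lt rest

theorem pvMain (kN : Nat) : ∀ (N : Nat) (s : List Int) (g : Int → Int), s.length ≤ N →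
    s.Pairwise (· ≤ ·) → pvNonneg g → (∀ v ∈ s, g v ≤ (s.count v : Int)) →
    pvLA kN g s = pvLB kN g (PySem.List.sorted (PySem.Set.ofList s) (fun x => x) false) := by
  intro N
  induction N with
  | zero =>
    intro s g hl _ _ _
    have hs : s = [] := by
      cases s with
      | nil => rfl
      | cons a t => simp at hl
    subst hs
    rfl
  | succ N ih =>
    intro s g hl hp hnn hcnt
    cases s with
    | nil => rfl
    | cons c t =>
      obtain ⟨hdec, hlt⟩ := pvDecomp (c :: t) c hp rfl
      have hm1 : 1 ≤ (c :: t).count c := by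
        have : c ∈ c :: t := by simp
        exact List.count_pos_iff.mpr this
      rw [pvKeysDecomp (c :: t) c (List.dropWhile (fun x => x == c) (c :: t))
        ((c :: t).count c) hdec hm1 hlt]
      have hrsub : (List.dropWhile (fun x => x == c) (c :: t)).Sublist (c :: t) :=
        List.dropWhile_sublist _
      have hrp : (List.dropWhile (fun x => x == c) (c :: t)).Pairwise (· ≤ ·) :=
        hp.sublist hrsub
      have hrlen : (List.dropWhile (fun x => x == c) (c :: t)).length < (c :: t).length := by
        have hlen := congrArg List.length hdec
        simp only [List.length_append, List.length_replicate] at hlen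
        omega
      have hcounts : ∀ v ∈ List.dropWhile (fun x => x == c) (c :: t),
          (c :: t).count v = (List.dropWhile (fun x => x == c) (c :: t)).count v := by
        intro v hv
        have hvc : v ≠ c := fun h => lt_irrefl c (h ▸ hlt v hv)
        conv_lhs => rw [hdec]
        rw [List.count_append, List.count_replicate]
        simp [Ne.symm hvc]
      have hgc_le : g c ≤ (((c :: t).count c : Nat) : Int) := hcnt c (by simp)
      conv_lhs => rw [hdec]
      rw [pvBlockA kN ((c :: t).count c) g c (List.dropWhile (fun x => x == c) (c :: t)) hnn hgc_le]
      rw [pvRep_eq kN (g c).toNat g c hnn]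
      simp only [pvLB]
      by_cases hgc : 0 < g c
      · rw [if_pos hgc]
        rw [pvWin_eq kN g c (g c)]
        have hcast : ((g c).toNat : Int) = g c := Int.toNat_of_nonneg (hnn c)
        rw [hcast]
        by_cases hcond : ∀ j : Nat, j < kN → g c ≤ g (c + (j : Int))
        · rw [if_pos hcond]
          show pvLA kN (pvSubW g c (g c) kN) _ = pvLB kN (pvSubW g c (g c) kN) _
          have hnn' : pvNonneg (pvSubW g c (g c) kN) := pvSubW_nonneg g c (g c) kN hnn hcond
          have hcnt' : ∀ v ∈ List.dropWhile (fun x => x == c) (c :: t),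
              pvSubW g c (g c) kN v ≤ (((List.dropWhile (fun x => x == c) (c :: t)).count v : Nat) : Int) := by
            intro v hv
            have h1 : pvSubW g c (g c) kN v ≤ g v := by
              simp only [pvSubW]
              split_ifs <;> omega
            have h2 := hcnt v (hrsub.subset hv)
            rw [hcounts v hv] at h2
            omega
          exact ih (List.dropWhile (fun x => x == c) (c :: t)) (pvSubW g c (g c) kN)
            (by omega) hrp hnn' hcnt'
        · rw [if_neg hcond]
      · rw [if_neg hgc]
        have hgc0 : g c = 0 := le_antisymm (not_lt.mp hgc) (hnn c)
        have ht0 : (g c).toNat = 0 := by omega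
        rw [ht0]
        rw [if_pos (fun j _ => by simpa using hnn (c + (j : Int)))]
        have hsub0 : pvSubW g c (((0 : Nat) : Nat) : Int) kN = g := by
          funext w
          simp only [pvSubW]
          split_ifs <;> simp
        rw [hsub0]
        show pvLA kN g _ = pvLB kN g _
        refine ih (List.dropWhile (fun x => x == c) (c :: t)) g (by omega) hrp hnn ?_
        intro v hv
        have h2 := hcnt v (hrsub.subset hv)
        rw [hcounts v hv] at h2
        exact h2

-- bridges between the Dict ports and the abstract layer

theorem pvGuardA (d : PySem.Dict Int Int) (cur : Int) :
    (!(d.contains cur) || d.getD cur 0 == 0) = true ↔ d.getD cur 0 = 0 := by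
  cases hc : d.contains cur with
  | false => simp [PySem.Dict.getD_of_not_contains d 0 hc]
  | true => simp

theorem pvConsumeA_aux : ∀ (n : Nat) (temp : Int) (d : PySem.Dict Int Int) (cur : Int),
    temp.toNat = n → pvNonneg (pvProj d) →
    Option.map pvProj (consumeA d cur temp) = pvWin (pvProj d) cur 1 n ∧
      (∀ d', consumeA d cur temp = some d' → pvNonneg (pvProj d')) := by
  intro n
  induction n with
  | zero =>
    intro temp d cur hn hnn
    have hneg : ¬ 0 < temp := by omega
    rw [consumeA, if_neg hneg]
    refine ⟨rfl, fun d' h => ?_⟩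
    have : d = d' := by simpa using h
    exact this ▸ hnn
  | succ n ihn =>
    intro temp d cur hn hnn
    have hpos : 0 < temp := by omega
    rw [consumeA, if_pos hpos]
    by_cases hz : d.getD cur 0 = 0
    · rw [if_pos ((pvGuardA d cur).mpr hz)]
      have hlt : pvProj d cur < 1 := by simp [pvProj, hz]
      constructor
      · simp [pvWin, hlt]
      · intro d' h
        exact absurd h (by simp)
    · rw [if_neg (fun h => hz ((pvGuardA d cur).mp h))]
      have hge : (1 : Int) ≤ d.getD cur 0 := by
        have := hnn cur
        simp only [pvProj] at this
        omega
      have hproj : pvProj (d.modify cur 0 (· - 1)) = pvUpd (pvProj d) cur (pvProj d cur - 1) := by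
        funext w
        simp only [pvProj, pvUpd]
        rw [PySem.Dict.getD_modify]
      have hnn2 : pvNonneg (pvProj (d.modify cur 0 (· - 1))) := by
        rw [hproj]
        intro v
        simp only [pvUpd, pvProj]
        split_ifs
        · omega
        · exact hnn v
      obtain ⟨hmap, hpres⟩ := ihn (temp - 1) (d.modify cur 0 (· - 1)) (cur + 1) (by omega) hnn2
      have hnlt : ¬ pvProj d cur < 1 := by
        simp only [pvProj]
        omega
      constructor
      · rw [hmap, hproj]
        simp only [pvWin]
        rw [if_neg hnlt]
      · intro d' h
        exact hpres d' h

theorem pvConsumeA_bridge : ∀ (temp : Int) (d : PySem.Dict Int Int) (cur : Int), pvNonneg (pvProj d) →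
    Option.map pvProj (consumeA d cur temp) = pvWin (pvProj d) cur 1 temp.toNat ∧
      (∀ d', consumeA d cur temp = some d' → pvNonneg (pvProj d')) := by
  intro temp d cur h
  exact pvConsumeA_aux temp.toNat temp d cur rfl h

theorem pvLoopA_bridge (k : Int) : ∀ (items : List Int) (d : PySem.Dict Int Int), pvNonneg (pvProj d) →
    loopA k d items = pvLA k.toNat (pvProj d) items := by
  intro items
  induction items with
  | nil => intro d _; rfl
  | cons x rest ih =>
    intro d hnn
    simp only [loopA, pvLA]
    by_cases hx : d.getD x 0 = 0
    · rw [if_pos (by simpa using hx), if_pos (by simpa [pvProj] using hx)]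
      exact ih d hnn
    · rw [if_neg (by simpa using hx), if_neg (by simpa [pvProj] using hx)]
      obtain ⟨hmap, hpres⟩ := pvConsumeA_bridge k d x hnn
      cases hc : consumeA d x k with
      | none =>
        rw [hc] at hmap
        simp only [Option.map] at hmap
        rw [← hmap]
      | some d2 =>
        rw [hc] at hmap
        simp only [Option.map] at hmap
        rw [← hmap]
        exact ih d2 (hpres d2 hc)

theorem pvConsumeB_bridge (k c need : Int) : ∀ (t : Nat) (a : Int) (cnt : PySem.Dict Int Int),
    (k - a).toNat = t →
    Option.map pvProj (consumeB cnt c need (PySem.List.pyRange a k 1)) =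
      pvWin (pvProj cnt) (c + a) need t := by
  intro t
  induction t with
  | zero =>
    intro a cnt ht
    rw [PySem.List.pyRange_one_eq_nil (by omega)]
    rfl
  | succ t ih =>
    intro a cnt ht
    rw [PySem.List.pyRange_one_cons (by omega)]
    simp only [consumeB, pvWin]
    by_cases hlt : cnt.getD (c + a) 0 < need
    · rw [if_pos hlt, if_pos (by simpa [pvProj] using hlt)]
      rfl
    · rw [if_neg hlt, if_neg (by simpa [pvProj] using hlt)]
      have hproj : pvProj (cnt.modify (c + a) 0 (· - need)) =
          pvUpd (pvProj cnt) (c + a) (pvProj cnt (c + a) - need) := by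
        funext w
        simp only [pvProj, pvUpd]
        rw [PySem.Dict.getD_modify]
      have hrec := ih (a + 1) (cnt.modify (c + a) 0 (· - need)) (by omega)
      rw [hproj, show c + (a + 1) = c + a + 1 by ring] at hrec
      exact hrec

theorem pvLoopB_bridge (k : Int) : ∀ (keys : List Int) (cnt : PySem.Dict Int Int),
    loopB k cnt keys = pvLB k.toNat (pvProj cnt) keys := by
  intro keys
  induction keys with
  | nil => intro cnt; rfl
  | cons c rest ih =>
    intro cnt
    simp only [loopB, pvLB]
    have hpp : pvProj cnt c = cnt.getD c 0 := rfl
    rw [hpp]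
    by_cases hc : 0 < cnt.getD c 0
    · simp only [if_pos hc]
      have hb := pvConsumeB_bridge k c (cnt.getD c 0) k.toNat 0 cnt (by omega)
      rw [add_zero] at hb
      cases hcb : consumeB cnt c (cnt.getD c 0) (PySem.List.pyRange 0 k 1) with
      | none =>
        rw [hcb] at hb
        simp only [Option.map] at hb
        rw [← hb]
      | some cnt2 =>
        rw [hcb] at hb
        simp only [Option.map] at hb
        rw [← hb]
        show loopB k cnt2 rest = pvLB k.toNat (pvProj cnt2) rest
        exact ih cnt2
    · simp only [if_neg hc]
      exact ih cnt

-- ===== VERDICT (by name: the statement is the Claim_ definition above) =====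
theorem groupBalls_spec : Claim_equal_groupBalls := by
  unfold Claim_equal_groupBalls
  intro arr k _ _
  unfold Spec_groupBalls
  simp only [groupBalls, groupBalls_alt]
  by_cases hmod : (PySem.Int.mod (arr.length : Int) k != 0) = true
  · simp only [if_pos hmod]
  · simp only [if_neg hmod]
    have hproj : ∀ v, pvProj (PySem.Dict.counter (PySem.List.sorted arr (fun x => x) false)) v =
        (((PySem.List.sorted arr (fun x => x) false).count v : Nat) : Int) := by
      intro v
      simp [pvProj, PySem.Dict.getD_counter]
    have hnn : pvNonneg (pvProj (PySem.Dict.counter (PySem.List.sorted arr (fun x => x) false))) := by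
      intro v
      rw [hproj v]
      exact Int.natCast_nonneg _
    rw [pvLoopA_bridge k (PySem.List.sorted arr (fun x => x) false) _ hnn,
      pvLoopB_bridge k _ _, PySem.Dict.keys_counter]
    have hpair : (PySem.List.sorted arr (fun x => x) false).Pairwise (· ≤ ·) := by
      have := PySem.List.sorted_pairwise arr (fun x => x)
      simpa using this
    refine pvMain k.toNat (PySem.List.sorted arr (fun x => x) false).length
      (PySem.List.sorted arr (fun x => x) false) _ le_rfl hpair hnn ?_
    intro v hv
    rw [hproj v]
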